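-- pv_equiv track=rewrite | github.com/Palwisha-18/python_programming_exercises | direction_catastrophe.py | simplify_directions
-- ===== SOURCE A (Python) =====
-- OPPOSITE_DIRECTIONS = {
--     'NORTH': 'SOUTH',
--     'SOUTH': 'NORTH',
--     'EAST': 'WEST',
--     'WEST': 'EAST'
-- }
--
-- def simplify_directions(directions: list) -> list:
--     final_directions = []
--
--     for i in range(len(directions)):
--         if not final_directions:
--             final_directions.append(directions[i])
--         else:
--             if OPPOSITE_DIRECTIONS[final_directions[-1]] == directions[i]:
--                 final_directions.pop()
--             else:
--                 final_directions.append(directions[i])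
--     return final_directions
-- ===== SOURCE B (Python) =====
-- OPPOSITE_DIRECTIONS = {
--     'NORTH': 'SOUTH',
--     'SOUTH': 'NORTH',
--     'EAST': 'WEST',
--     'WEST': 'EAST'
-- }
--
-- def simplify_directions(directions: list) -> list:
--     # Repeated-pass reduction: each pass scans the current list and cancels
--     # every adjacent opposite pair it meets (skipping both); repeat until a
--     # pass makes no cancellation.  Adjacent-opposite cancellation is
--     # confluent, so the fixpoint equals A's single-stack reduction.
--     current = directions
--     while True:
--         nxt = []
--         changed = False
--         i = 0
--         n = len(current)
--         while i < n:
--             if i + 1 < n and OPPOSITE_DIRECTIONS[current[i]] == current[i + 1]: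
--                 i += 2
--                 changed = True
--             else:
--                 nxt.append(current[i])
--                 i += 1
--         if not changed:
--             return nxt
--         current = nxt
-- ===== Notes on version B (the rewrite author's own statement) =====
-- stated objective: alternative
-- what changed: B replaces A's single left-to-right stack pass by repeated full passes that each cancel adjacent opposite pairs in place, iterated to a fixpoint; confluence of adjacent-opposite cancellation makes the fixpoint equal A's stack result on Pre_ (inputs where A's raising dict lookup never hits an invalid direction).
import Mathlib
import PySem

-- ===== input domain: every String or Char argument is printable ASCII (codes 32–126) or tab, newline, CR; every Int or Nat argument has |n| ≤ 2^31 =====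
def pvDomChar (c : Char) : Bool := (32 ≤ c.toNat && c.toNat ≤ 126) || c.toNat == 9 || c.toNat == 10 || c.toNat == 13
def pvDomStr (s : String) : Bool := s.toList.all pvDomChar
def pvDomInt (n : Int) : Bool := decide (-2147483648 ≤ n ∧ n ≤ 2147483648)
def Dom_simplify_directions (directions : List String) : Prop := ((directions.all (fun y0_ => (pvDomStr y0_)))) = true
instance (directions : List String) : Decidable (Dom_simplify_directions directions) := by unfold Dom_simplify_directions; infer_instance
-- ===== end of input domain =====

-- B replaces A's single stack pass by repeated whole-list passes cancelling adjacent
-- opposite pairs, iterated to a fixpoint; return values agree on Pre_.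

-- OPPOSITE_DIRECTIONS (module constant, shared by both ports)
def oppD : PySem.Dict String String :=
  PySem.Dict.ofList [("NORTH", "SOUTH"), ("SOUTH", "NORTH"), ("EAST", "WEST"), ("WEST", "EAST")]

-- ===== PORT A =====
-- one loop iteration of A (stack `fd`, top at the end; the KeyError branch, excluded
-- by Pre_, is rendered as "no cancellation" via Option.bind)
def astep (fd : List String) (d : String) : List String :=
  if fd.isEmpty then fd ++ [d]
  else if (PySem.List.pyGet? fd (-1)).bind (fun t => oppD.get? t) = some d then fd.dropLast
  else fd ++ [d]

def simplify_directions (directions : List String) : List String :=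
  directions.foldl astep []

-- ===== PORT B =====
-- one inner pass of B: walk the list, cancel each adjacent opposite pair (skip both),
-- return the rebuilt list and the `changed` flag (the dict lookup `OPPOSITE_DIRECTIONS[x]`
-- raising on invalid x is excluded by Pre_; rendered as get? comparison)
def pass1 : List String → List String × Bool
  | [] => ([], false)
  | [x] => ([x], false)
  | x :: y :: rest =>
    if oppD.get? x = some y then ((pass1 rest).1, true)
    else (x :: (pass1 (y :: rest)).1, (pass1 (y :: rest)).2)

-- termination facts for the outer `while True` loop (cited by reduceFix)
lemma pass1_le : ∀ l : List String, (pass1 l).1.length ≤ l.length := by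
  intro l
  induction l using pass1.induct with
  | case1 => simp [pass1]
  | case2 => simp [pass1]
  | case3 x y rest h ih => simp only [pass1, if_pos h]; simpa using Nat.le_add_right_of_le (Nat.le_succ_of_le ih)
  | case4 x y rest h ih => simp only [pass1, if_neg h, List.length_cons]; simpa using ih

lemma pass1_lt : ∀ l : List String, (pass1 l).2 = true → (pass1 l).1.length < l.length := by
  intro l
  induction l using pass1.induct with
  | case1 => simp [pass1]
  | case2 => simp [pass1]
  | case3 x y rest h ih =>
    intro _
    simp only [pass1, if_pos h, List.length_cons]
    exact Nat.lt_succ_of_lt (Nat.lt_succ_of_le (pass1_le rest))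
  | case4 x y rest h ih =>
    intro hc
    simp only [pass1, if_neg h] at hc ⊢
    simpa using ih hc

-- the outer loop: repeat passes until none cancels
def reduceFix (l : List String) : List String :=
  if h : (pass1 l).2 = true then reduceFix (pass1 l).1 else (pass1 l).1
termination_by l.length
decreasing_by exact pass1_lt l h

def simplify_directions_alt (directions : List String) : List String :=
  reduceFix directions

-- ===== PRECONDITION & SPEC =====
-- Pre_ excludes exactly the inputs on which Python A raises KeyError: those with an
-- invalid direction anywhere except the last position (such an element becomes the
-- stack top and is then looked up in OPPOSITE_DIRECTIONS).
def Pre_simplify_directions (directions : List String) : Prop :=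
  ∀ d ∈ directions.dropLast, oppD.contains d = true
instance (directions : List String) : Decidable (Pre_simplify_directions directions) := by
  unfold Pre_simplify_directions; infer_instance

def pvWitness_simplify_directions : List String := ["NORTH", "EAST", "WEST", "SOUTH", "NORTH"]

def Spec_simplify_directions (directions : List String) (out : List String) : Prop :=
  out = simplify_directions_alt directions
instance (directions : List String) (out : List String) : Decidable (Spec_simplify_directions directions out) := by
  unfold Spec_simplify_directions; infer_instance

-- ===== CLAIM (what is proved, stated in full; the proofs are below) =====
def Claim_equal_simplify_directions : Prop := ∀ (directions : List String), Dom_simplify_directions directions → Pre_simplify_directions directions → Spec_simplify_directions directions (simplify_directions directions)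

-- ===== LEMMAS AND PROOFS =====

-- characterisation of the opposite-direction lookup
lemma opp_mem (x y : String) : oppD.get? x = some y ↔
    (x = "NORTH" ∧ y = "SOUTH") ∨ (x = "SOUTH" ∧ y = "NORTH") ∨
    (x = "EAST" ∧ y = "WEST") ∨ (x = "WEST" ∧ y = "EAST") := by
  have hd : oppD = PySem.Dict.mk
      [("NORTH", "SOUTH"), ("SOUTH", "NORTH"), ("EAST", "WEST"), ("WEST", "EAST")] := by decide
  rw [hd]
  simp only [PySem.Dict.get?_mk_cons, beq_iff_eq]
  split_ifs with h1 h2 h3 h4 <;> subst_vars <;> simp [PySem.Dict.get?, eq_comm] <;> tauto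

lemma opp_symm (x y : String) : oppD.get? x = some y ↔ oppD.get? y = some x := by
  rw [opp_mem, opp_mem]; tauto

-- abstract one-element reduction against an already-reduced list (foldr form)
def cstep (d : String) (r : List String) : List String :=
  match r with
  | [] => [d]
  | t :: ts => if oppD.get? d = some t then ts else d :: t :: ts

def nf (l : List String) : List String := l.foldr cstep []

lemma nf_cons (d : String) (l : List String) : nf (d :: l) = cstep d (nf l) := rfl

-- "no adjacent opposite pair"
def Red (l : List String) : Prop := List.IsChain (fun a b => oppD.get? a ≠ some b) l

lemma cstep_red (d : String) (r : List String) (h : Red r) : Red (cstep d r) := by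
  cases r with
  | nil => exact List.IsChain.singleton d
  | cons t ts =>
    simp only [cstep]
    by_cases hc : oppD.get? d = some t
    · rw [if_pos hc]; exact h.tail
    · rw [if_neg hc]; exact List.isChain_cons_cons.mpr ⟨hc, h⟩

lemma nf_red (l : List String) : Red (nf l) := by
  induction l with
  | nil => exact List.isChain_nil
  | cons d l ih => exact cstep_red d (nf l) ih

lemma nf_fix (l : List String) (h : Red l) : nf l = l := by
  induction l with
  | nil => rfl
  | cons d l ih =>
    rw [nf_cons, ih h.tail]
    cases l with
    | nil => rfl
    | cons t ts =>
      show (if oppD.get? d = some t then ts else d :: t :: ts) = d :: t :: ts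
      rw [if_neg (List.rel_of_isChain_cons_cons h)]

lemma cancel2 (x y : String) (h : oppD.get? x = some y) (r : List String) (hr : Red r) :
    cstep x (cstep y r) = r := by
  cases r with
  | nil => simp only [cstep]; rw [if_pos h]
  | cons t ts =>
    simp only [cstep]
    by_cases hc : oppD.get? y = some t
    · rw [if_pos hc]
      have hyx : oppD.get? y = some x := (opp_symm x y).mp h
      have hxt : x = t := by rw [hyx] at hc; exact (Option.some_injective _ hc)
      subst hxt
      cases ts with
      | nil => rfl
      | cons u us =>
        show (if oppD.get? x = some u then us else x :: u :: us) = x :: u :: us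
        rw [if_neg (List.rel_of_isChain_cons_cons hr)]
    · rw [if_neg hc]
      show (if oppD.get? x = some y then t :: ts else x :: y :: t :: ts) = t :: ts
      rw [if_pos h]

-- A-side: bridge the end-of-list stack to nf (head-stack step)
def hstep (st : List String) (d : String) : List String :=
  match st with
  | [] => [d]
  | t :: ts => if oppD.get? t = some d then ts else d :: t :: ts

lemma hstep_red (st : List String) (d : String) (h : Red st) : Red (hstep st d) := by
  cases st with
  | nil => exact List.IsChain.singleton d
  | cons t ts =>
    simp only [hstep]
    by_cases hc : oppD.get? t = some d
    · rw [if_pos hc]; exact h.tail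
    · rw [if_neg hc]
      exact List.isChain_cons_cons.mpr ⟨fun h' => hc ((opp_symm d t).mp h'), h⟩

lemma red_reverse (l : List String) (h : Red l) : Red l.reverse := by
  rw [Red, List.isChain_reverse]
  exact List.IsChain.imp (fun a b hab h' => hab ((opp_symm _ _).mp h')) h

lemma cancel_mid (x y : String) (h : oppD.get? x = some y) :
    ∀ a b : List String, nf (a ++ x :: y :: b) = nf (a ++ b) := by
  intro a b
  induction a with
  | nil => simp only [List.nil_append, nf_cons]; rw [cancel2 x y h (nf b) (nf_red b)]
  | cons z a ih => simp only [List.cons_append, nf_cons, ih]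

lemma stack_inv : ∀ (w st : List String), Red st →
    (List.foldl hstep st w).reverse = nf (st.reverse ++ w) := by
  intro w
  induction w with
  | nil =>
    intro st hst
    simp only [List.foldl_nil, List.append_nil]
    rw [nf_fix st.reverse (red_reverse st hst)]
  | cons d w ih =>
    intro st hst
    rw [List.foldl_cons, ih (hstep st d) (hstep_red st d hst)]
    cases st with
    | nil => simp [hstep]
    | cons t ts =>
      simp only [hstep]
      by_cases hc : oppD.get? t = some d
      · rw [if_pos hc]
        have h2 := cancel_mid t d hc ts.reverse w
        simp only [List.reverse_cons, List.append_assoc, List.singleton_append]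
        exact h2.symm
      · rw [if_neg hc]
        simp [List.append_assoc]

lemma astep_eq (fd : List String) (d : String) : astep fd d = (hstep fd.reverse d).reverse := by
  rcases fd.eq_nil_or_concat with rfl | ⟨ts, t, rfl⟩
  · rfl
  · by_cases hc : oppD.get? t = some d <;>
      simp [astep, hstep, PySem.List.pyGet?_neg_one, hc, List.concat_eq_append]

lemma foldl_astep (w : List String) : ∀ fd : List String,
    List.foldl astep fd w = (List.foldl hstep fd.reverse w).reverse := by
  induction w with
  | nil => intro fd; simp
  | cons d w ih =>
    intro fd
    rw [List.foldl_cons, ih (astep fd d), astep_eq, List.reverse_reverse]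
    rfl

lemma a_eq_nf (w : List String) : simplify_directions w = nf w := by
  have h := stack_inv w [] List.isChain_nil
  simp only [List.reverse_nil, List.nil_append] at h
  rw [simplify_directions, foldl_astep, List.reverse_nil, h]

-- B-side: one pass preserves the normal form, and a pass without cancellation is identity on a reduced list
lemma nf_pass1 : ∀ l : List String, nf (pass1 l).1 = nf l := by
  intro l
  induction l using pass1.induct with
  | case1 => rfl
  | case2 => rfl
  | case3 x y rest h ih =>
    simp only [pass1, if_pos h]
    rw [ih]
    have := cancel_mid x y h [] rest
    simpa using this.symm
  | case4 x y rest h ih =>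
    simp only [pass1, if_neg h, nf_cons]
    rw [ih]
    rfl

lemma pass1_false : ∀ l : List String, (pass1 l).2 = false → (pass1 l).1 = l ∧ Red l := by
  intro l
  induction l using pass1.induct with
  | case1 => intro _; exact ⟨rfl, List.isChain_nil⟩
  | case2 x => intro _; exact ⟨rfl, List.IsChain.singleton x⟩
  | case3 x y rest h ih => simp [pass1, if_pos h]
  | case4 x y rest h ih =>
    intro hc
    simp only [pass1, if_neg h] at hc ⊢
    obtain ⟨h1, h2⟩ := ih hc
    exact ⟨by rw [h1], List.isChain_cons_cons.mpr ⟨h, h2⟩⟩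

lemma reduceFix_eq_nf : ∀ l : List String, reduceFix l = nf l := by
  intro l
  induction l using reduceFix.induct with
  | case1 l h ih =>
    rw [reduceFix, dif_pos h, ih, nf_pass1]
  | case2 l h =>
    rw [reduceFix, dif_neg h]
    obtain ⟨h1, h2⟩ := pass1_false l (by simpa using h)
    rw [h1, nf_fix l h2]

lemma b_eq_nf (w : List String) : simplify_directions_alt w = nf w := by
  rw [simplify_directions_alt, reduceFix_eq_nf]

-- ===== VERDICT (by name: the statement is the Claim_ definition above) =====
theorem simplify_directions_spec : Claim_equal_simplify_directions := by
  intro directions _ _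
  unfold Spec_simplify_directions
  rw [a_eq_nf, b_eq_nf]
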